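-- pv_equiv track=rewrite | github.com/kyw613/CodingTest | 프로그래머스/1/64061. 크레인 인형뽑기 게임/크레인 인형뽑기 게임.py | solution
-- ===== SOURCE A (Python) =====
-- def solution(board, moves):
--     stack = []
--     n = len(board)
--     graph = []
--     answer = 0
--     for i in range(n):
--         graph.append([board[k][i] for k in range(n) if board[k][i] != 0 ] )
--     for m in moves:
--         if not graph[m-1]:
--             continue
--         s = graph[m-1].pop(0)
--         if not stack:
--             stack.append(s)
--         elif stack[-1] == s:
--             stack.pop()
--             answer += 2
--         else:
--             stack.append(s)
--     return answer
-- ===== SOURCE B (Python) =====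
-- def solution(board, moves):
--     n = len(board)
--     top = [0] * n
--     stack = []
--     answer = 0
--     for m in moves:
--         col = m - 1
--         i = top[col]
--         while i < n and board[i][col] == 0:
--             i += 1
--         if i == n:
--             continue
--         s = board[i][col]
--         top[col] = i + 1
--         if stack and stack[-1] == s:
--             stack.pop()
--             answer += 2
--         else:
--             stack.append(s)
--     return answer
-- ===== Notes on version B (the rewrite author's own statement) =====
-- stated objective: alternative
-- what changed: Instead of precomputing all n compacted column lists and popping their fronts, B keeps a per-column pointer array and scans each column downward on demand, skipping zeros, so no column data is ever copied or rebuilt (same asymptotics in the worst case; a timing run could not measure a difference here).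
-- outside the precondition, e.g. on solution([[1, 2, 9], [1, 2, 8]], [0, 0]): A returns 2, B returns 0
import Mathlib
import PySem

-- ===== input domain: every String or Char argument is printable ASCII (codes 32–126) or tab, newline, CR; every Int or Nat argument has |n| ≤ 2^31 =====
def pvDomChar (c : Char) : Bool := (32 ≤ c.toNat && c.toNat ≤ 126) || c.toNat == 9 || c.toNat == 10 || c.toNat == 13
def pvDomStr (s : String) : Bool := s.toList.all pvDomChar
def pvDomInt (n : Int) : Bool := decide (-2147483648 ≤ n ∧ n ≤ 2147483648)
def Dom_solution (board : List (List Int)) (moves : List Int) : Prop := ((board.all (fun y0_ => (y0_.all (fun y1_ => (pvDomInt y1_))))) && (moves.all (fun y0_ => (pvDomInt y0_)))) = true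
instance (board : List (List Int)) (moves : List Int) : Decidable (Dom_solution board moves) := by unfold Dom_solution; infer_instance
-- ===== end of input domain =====

-- B replaces A's upfront build of all n compacted column lists by a per-column pointer array with
-- on-demand downward scans that skip zeros; equal answer on Pre_ (in both ports the Python stack,
-- pushed/popped at the end, is represented with its top at the list head).

-- ===== PORT A =====
-- one iteration of A's `for m in moves` loop over the state (graph, stack, answer)
def solAStep (st : List (List Int) × List Int × Int) (m : Int) :
    List (List Int) × List Int × Int :=
  match PySem.List.pyGetD st.1 (m - 1) [] with
  | [] => st                                   -- `if not graph[m-1]: continue`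
  | s :: rest =>                               -- `s = graph[m-1].pop(0)`
    let g' := PySem.List.pySetD st.1 (m - 1) rest
    match st.2.1 with
    | [] => (g', [s], st.2.2)                  -- `if not stack: stack.append(s)`
    | t :: sr =>
      if t = s then (g', sr, st.2.2 + 2)       -- `elif stack[-1] == s: stack.pop(); answer += 2`
      else (g', s :: t :: sr, st.2.2)          -- `else: stack.append(s)`

def solution (board : List (List Int)) (moves : List Int) : Int :=
  let n := board.length
  let graph := (List.range n).map (fun (i : Nat) =>
    ((List.range n).map (fun (k : Nat) =>
      PySem.List.pyGetD (PySem.List.pyGetD board (k : Int) []) (i : Int) 0)).filter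
      (fun v => v != 0))
  (moves.foldl solAStep (graph, [], 0)).2.2

-- ===== PORT B =====
-- B's `while i < n and board[i][col] == 0: i += 1`
def findNz (board : List (List Int)) (col : Int) (n : Nat) (i : Int) : Int :=
  if _h : i < (n : Int) then
    if PySem.List.pyGetD (PySem.List.pyGetD board i []) col 0 = 0 then
      findNz board col n (i + 1)
    else i
  else i
termination_by ((n : Int) - i).toNat
decreasing_by omega

-- one iteration of B's `for m in moves` loop over the state (top, stack, answer)
def solBStep (board : List (List Int)) (n : Nat)
    (st : List Int × List Int × Int) (m : Int) : List Int × List Int × Int :=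
  let col := m - 1
  let i := findNz board col n (PySem.List.pyGetD st.1 col 0)
  if i = (n : Int) then st                     -- `if i == n: continue`
  else
    let s := PySem.List.pyGetD (PySem.List.pyGetD board i []) col 0
    let top' := PySem.List.pySetD st.1 col (i + 1)
    match st.2.1 with
    | t :: sr =>
      if t = s then (top', sr, st.2.2 + 2)     -- `if stack and stack[-1] == s: stack.pop(); answer += 2`
      else (top', s :: t :: sr, st.2.2)
    | [] => (top', [s], st.2.2)

def solution_alt (board : List (List Int)) (moves : List Int) : Int :=
  let n := board.length
  (moves.foldl (solBStep board n) (List.replicate n 0, [], 0)).2.2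

-- ===== PRECONDITION & SPEC =====
-- Pre_ admits every input where A returns, except that when a move m ≤ 0 is present (Python's
-- negative-index wraparound into `graph`) the board must be square: on wider rows A's graph[m-1]
-- counts columns among the first n per row while B's board[i][m-1] wraps within the full row, and
-- neither reading of such an out-of-range 1-based move is specified.
def Pre_solution (board : List (List Int)) (moves : List Int) : Prop :=
  (∀ row ∈ board, board.length ≤ row.length) ∧
  (∀ m ∈ moves, 1 - (board.length : Int) ≤ m ∧ m ≤ (board.length : Int)) ∧
  ((∃ m ∈ moves, m ≤ 0) → ∀ row ∈ board, row.length = board.length)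
instance (board : List (List Int)) (moves : List Int) : Decidable (Pre_solution board moves) := by
  unfold Pre_solution; infer_instance

def pvWitness_solution : List (List Int) × List Int := ([[0, 1], [2, 1]], [2, 2, 1])

def Spec_solution (board : List (List Int)) (moves : List Int) (out : Int) : Prop :=
  out = solution_alt board moves
instance (board : List (List Int)) (moves : List Int) (out : Int) :
    Decidable (Spec_solution board moves out) := by unfold Spec_solution; infer_instance

-- ===== CLAIM (what is proved, stated in full; the proofs are below) =====
def Claim_equal_solution : Prop := ∀ (board : List (List Int)) (moves : List Int),
  Dom_solution board moves → Pre_solution board moves →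
  Spec_solution board moves (solution board moves)

-- ===== LEMMAS AND PROOFS =====

-- the board entry at row i, column c (0 beyond the board), as A's graph construction reads it
def colv (board : List (List Int)) (i c : Nat) : Int := (board.getD i []).getD c 0

-- the nonzero entries of column c from row t down, in order: A's remaining graph[c] after
-- the rows before t have been popped
def compact (board : List (List Int)) (c t : Nat) : List Int :=
  ((List.range' t (board.length - t)).map (fun k => colv board k c)).filter (fun v => v != 0)

-- the coupling between A's state (graph) and B's state (top)
def StInv (board : List (List Int)) (g : List (List Int)) (top : List Int) : Prop :=
  g.length = board.length ∧ top.length = board.length ∧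
  ∀ c < board.length, ∃ t, t ≤ board.length ∧ top.getD c 0 = (t : Int) ∧
    g.getD c [] = compact board c t

-- the stack/answer transition both step functions share once the popped doll s is known
def pushPop (stack : List Int) (ans : Int) (s : Int) : List Int × Int :=
  match stack with
  | [] => ([s], ans)
  | t' :: sr => if t' = s then (sr, ans + 2) else (s :: t' :: sr, ans)

-- xs[-k] = v for 0 < k ≤ len(xs) (the negative-index case pySetD_of_nonneg does not cover)
lemma pySetD_neg_gen {α : Type} (xs : List α) (k : Nat) (v : α) (h0 : 0 < k)
    (h1 : k ≤ xs.length) :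
    PySem.List.pySetD xs (-(k : Int)) v = xs.set (xs.length - k) v := by
  have hk2 : -(xs.length : Int) ≤ -(k : Int) := by omega
  simp [PySem.List.pySetD, PySem.List.pySet?, PySem.List.pyIdx?, hk2, h0.ne']

lemma compact_succ (board : List (List Int)) (c t : Nat) (ht : t < board.length) :
    compact board c t =
      if colv board t c ≠ 0 then colv board t c :: compact board c (t + 1)
      else compact board c (t + 1) := by
  have h1 : board.length - t = (board.length - (t + 1)) + 1 := by omega
  rw [compact, h1, List.range'_succ]
  by_cases h : colv board t c = 0 <;> simp [h, compact]

-- B's scan against A's remaining column: empty tail ⇒ the scan runs to n;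
-- otherwise it stops at the row holding the head and leaves exactly the tail behind
lemma findNz_spec (board : List (List Int)) (col : Int) (c : Nat)
    (hrow : ∀ i < board.length,
      PySem.List.pyGetD (PySem.List.pyGetD board (i : Int) []) col 0 = colv board i c)
    (t : Nat) (ht : t ≤ board.length) :
    (compact board c t = [] → findNz board col board.length (t : Int) = (board.length : Int)) ∧
    (∀ s rest, compact board c t = s :: rest → ∃ j : Nat, t ≤ j ∧ j < board.length ∧
      findNz board col board.length (t : Int) = (j : Int) ∧ colv board j c = s ∧
      rest = compact board c (j + 1)) := by
  induction hd : board.length - t generalizing t with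
  | zero =>
    have htn : t = board.length := by omega
    subst htn
    have hcomp : compact board c board.length = [] := by simp [compact]
    constructor
    · intro _; rw [findNz]; simp
    · intro s rest h; rw [hcomp] at h; cases h
  | succ k ih =>
    have htlt : t < board.length := by omega
    have hcast : ((t : Int) + 1) = ((t + 1 : Nat) : Int) := by push_cast; ring
    have hrw : PySem.List.pyGetD (PySem.List.pyGetD board (t : Int) []) col 0 = colv board t c :=
      hrow t htlt
    by_cases hz : colv board t c = 0
    · have hstep : findNz board col board.length (t : Int) =
          findNz board col board.length ((t + 1 : Nat) : Int) := by
        rw [findNz, dif_pos (by exact_mod_cast htlt), hrw, if_pos hz, hcast]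
      have hcs : compact board c t = compact board c (t + 1) := by
        rw [compact_succ board c t htlt]; simp [hz]
      obtain ⟨ih1, ih2⟩ := ih (t + 1) (by omega) (by omega)
      refine ⟨fun h => ?_, fun s rest h => ?_⟩
      · rw [hstep]; exact ih1 (hcs ▸ h)
      · obtain ⟨j, hj1, hj2, hj3, hj4, hj5⟩ := ih2 s rest (hcs ▸ h)
        exact ⟨j, by omega, hj2, hstep ▸ hj3, hj4, hj5⟩
    · have hstop : findNz board col board.length (t : Int) = (t : Int) := by
        rw [findNz, dif_pos (by exact_mod_cast htlt), hrw, if_neg hz]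
      have hcs : compact board c t = colv board t c :: compact board c (t + 1) := by
        rw [compact_succ board c t htlt]; simp [hz]
      refine ⟨fun h => ?_, fun s rest h => ?_⟩
      · rw [hcs] at h; cases h
      · rw [hcs] at h
        injection h with h1 h2
        exact ⟨t, le_refl t, htlt, hstop, h1, h2.symm⟩

-- both ports' Python-style index m-1 (nonnegative, or one negative wrap on a square board)
-- denotes the same plain column number c in every list access either step makes
lemma idx_norm (board : List (List Int)) (m : Int)
    (hrows : ∀ row ∈ board, board.length ≤ row.length)
    (hmlo : 1 - (board.length : Int) ≤ m) (hmhi : m ≤ (board.length : Int))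
    (hsq : m ≤ 0 → ∀ row ∈ board, row.length = board.length)
    (g : List (List Int)) (top : List Int)
    (hgl : g.length = board.length) (htl : top.length = board.length) :
    ∃ c : Nat, c < board.length ∧
      PySem.List.pyGetD g (m-1) [] = g.getD c [] ∧
      PySem.List.pyGetD top (m-1) 0 = top.getD c 0 ∧
      (∀ v, PySem.List.pySetD g (m-1) v = g.set c v) ∧
      (∀ v, PySem.List.pySetD top (m-1) v = top.set c v) ∧
      (∀ i < board.length, PySem.List.pyGetD (PySem.List.pyGetD board (i:Int) []) (m-1) 0 = colv board i c) := by
  by_cases hpos : 1 ≤ m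
  · refine ⟨(m-1).toNat, by omega, ?_, ?_, ?_, ?_, ?_⟩
    · rw [PySem.List.pyGetD_eq_getElem g [] (by omega) (by omega),
        List.getD_eq_getElem _ _ (by omega)]
    · rw [PySem.List.pyGetD_eq_getElem top 0 (by omega) (by omega),
        List.getD_eq_getElem _ _ (by omega)]
    · intro v; rw [PySem.List.pySetD_of_nonneg g v (by omega)]
    · intro v; rw [PySem.List.pySetD_of_nonneg top v (by omega)]
    · intro i hi
      have hmem : board.getD i [] ∈ board := by
        rw [List.getD_eq_getElem _ _ hi]; exact List.getElem_mem _
      have hlen : board.length ≤ (board.getD i []).length := hrows _ hmem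
      rw [PySem.List.pyGetD_natCast,
        PySem.List.pyGetD_eq_getElem _ 0 (by omega) (by omega), colv]
      exact (List.getD_eq_getElem _ _ (by omega)).symm
  · have hm0 : m ≤ 0 := by omega
    have hsq' := hsq hm0
    set k : Nat := (1 - m).toNat with hk
    have hk0 : 0 < k := by omega
    have hkn : k ≤ board.length := by omega
    have hneg : m - 1 = -(k : Int) := by omega
    refine ⟨board.length - k, by omega, ?_, ?_, ?_, ?_, ?_⟩
    · rw [hneg, PySem.List.pyGetD_neg_natCast g k [] hk0 (by omega),
        List.getD_eq_getElem _ _ (by omega)]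
      congr 1; omega
    · rw [hneg, PySem.List.pyGetD_neg_natCast top k 0 hk0 (by omega),
        List.getD_eq_getElem _ _ (by omega)]
      congr 1; omega
    · intro v; rw [hneg, pySetD_neg_gen g k v hk0 (by omega), hgl]
    · intro v; rw [hneg, pySetD_neg_gen top k v hk0 (by omega), htl]
    · intro i hi
      have hmem : board.getD i [] ∈ board := by
        rw [List.getD_eq_getElem _ _ hi]; exact List.getElem_mem _
      have hlen : (board.getD i []).length = board.length := hsq' _ hmem
      rw [PySem.List.pyGetD_natCast, hneg,
        PySem.List.pyGetD_neg_natCast _ k 0 hk0 (by omega), colv,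
        List.getD_eq_getElem _ _ (show board.length - k < (board.getD i []).length by omega)]
      congr 1; omega

-- one move: the two step functions act identically on (stack, answer) and preserve StInv
lemma step_eq (board : List (List Int)) (m : Int)
    (hrows : ∀ row ∈ board, board.length ≤ row.length)
    (hmlo : 1 - (board.length : Int) ≤ m) (hmhi : m ≤ (board.length : Int))
    (hsq : m ≤ 0 → ∀ row ∈ board, row.length = board.length)
    (g : List (List Int)) (top stack : List Int) (ans : Int)
    (hInv : StInv board g top) :
    (solAStep (g, stack, ans) m).2 = (solBStep board board.length (top, stack, ans) m).2 ∧
    StInv board (solAStep (g, stack, ans) m).1 (solBStep board board.length (top, stack, ans) m).1 := by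
  obtain ⟨hgl, htl, hcols⟩ := hInv
  obtain ⟨c, hc, hg, ht, hsetg, hsett, hrow⟩ :=
    idx_norm board m hrows hmlo hmhi hsq g top hgl htl
  obtain ⟨t, htn, htop, hgc⟩ := hcols c hc
  have hfnz := findNz_spec board (m - 1) c hrow t htn
  cases hcase : compact board c t with
  | nil =>
    have hA : solAStep (g, stack, ans) m = (g, stack, ans) := by
      simp only [solAStep, hg, hgc, hcase]
    have hB : solBStep board board.length (top, stack, ans) m = (top, stack, ans) := by
      simp only [solBStep, ht, htop, hfnz.1 hcase, if_pos]
    rw [hA, hB]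
    exact ⟨rfl, hgl, htl, hcols⟩
  | cons s rest =>
    obtain ⟨j, hj1, hj2, hj3, hj4, hj5⟩ := hfnz.2 s rest hcase
    have hjne : ((j : Int)) ≠ (board.length : Int) := by exact_mod_cast hj2.ne
    have hs : PySem.List.pyGetD (PySem.List.pyGetD board (j : Int) []) (m - 1) 0 = s := by
      rw [hrow j hj2, hj4]
    have hA : solAStep (g, stack, ans) m = (g.set c rest, pushPop stack ans s) := by
      simp only [solAStep, hg, hgc, hcase, hsetg, pushPop]
      cases stack with
      | nil => rfl
      | cons t' sr => by_cases h : t' = s <;> simp [h]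
    have hB : solBStep board board.length (top, stack, ans) m =
        (top.set c ((j : Int) + 1), pushPop stack ans s) := by
      simp only [solBStep, ht, htop, hj3, if_neg hjne, hs, hsett, pushPop]
      cases stack with
      | nil => rfl
      | cons t' sr => by_cases h : t' = s <;> simp [h]
    rw [hA, hB]
    refine ⟨rfl, by simpa using hgl, by simpa using htl, ?_⟩
    intro c' hc'
    by_cases hcc : c' = c
    · subst hcc
      refine ⟨j + 1, by omega, ?_, ?_⟩
      · rw [List.getD_eq_getElem _ _ (by simpa [htl] using hc'),
          List.getElem_set_self]
        push_cast; ring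
      · rw [List.getD_eq_getElem _ _ (by simpa [hgl] using hc'),
          List.getElem_set_self]
        exact hj5
    · obtain ⟨t', ht'n, ht'top, ht'g⟩ := hcols c' hc'
      refine ⟨t', ht'n, ?_, ?_⟩
      · rw [List.getD_eq_getElem _ _ (by simpa [htl] using hc'),
          List.getElem_set_ne (by omega)]
        rw [List.getD_eq_getElem _ _ (by omega)] at ht'top
        exact ht'top
      · rw [List.getD_eq_getElem _ _ (by simpa [hgl] using hc'),
          List.getElem_set_ne (by omega)]
        rw [List.getD_eq_getElem _ _ (by omega)] at ht'g
        exact ht'g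

-- the whole loop
lemma loop_eq (board : List (List Int))
    (hrows : ∀ row ∈ board, board.length ≤ row.length)
    (moves : List Int)
    (hm : ∀ m ∈ moves, (1 - (board.length : Int) ≤ m ∧ m ≤ (board.length : Int)) ∧
      (m ≤ 0 → ∀ row ∈ board, row.length = board.length))
    (stA : List (List Int) × List Int × Int) (stB : List Int × List Int × Int)
    (h2 : stA.2 = stB.2) (hInv : StInv board stA.1 stB.1) :
    (moves.foldl solAStep stA).2 = (moves.foldl (solBStep board board.length) stB).2 := by
  induction moves generalizing stA stB with
  | nil => simpa using h2
  | cons m ms ih =>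
    obtain ⟨g, stack, ans⟩ := stA
    obtain ⟨top, stack', ans'⟩ := stB
    obtain ⟨h2a, h2b⟩ := Prod.mk.injEq .. ▸ h2
    subst h2a h2b
    obtain ⟨hstep, hinv'⟩ := step_eq board m hrows (hm m (by simp)).1.1 (hm m (by simp)).1.2
      (hm m (by simp)).2 g top stack ans hInv
    simp only [List.foldl_cons]
    exact ih (fun x hx => hm x (by simp [hx])) _ _ hstep hinv'

-- the initial states satisfy StInv (each full compacted column against pointer 0)
lemma init_inv (board : List (List Int)) :
    StInv board
      ((List.range board.length).map (fun (i : Nat) =>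
        ((List.range board.length).map (fun (k : Nat) =>
          PySem.List.pyGetD (PySem.List.pyGetD board (k : Int) []) (i : Int) 0)).filter
          (fun v => v != 0)))
      (List.replicate board.length 0) := by
  refine ⟨by simp, by simp, fun c hc => ⟨0, by omega, by simp, ?_⟩⟩
  rw [List.getD_eq_getElem _ _ (by simpa using hc)]
  simp [compact, colv, List.range_eq_range', PySem.List.pyGetD_natCast]

-- ===== VERDICT (by name: the statement is the Claim_ definition above) =====
theorem solution_spec : Claim_equal_solution := by
  intro board moves _hdom hpre
  obtain ⟨hrows, hm, hsq⟩ := hpre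
  show solution board moves = solution_alt board moves
  have h := loop_eq board hrows moves
    (fun m hmm => ⟨hm m hmm, fun hle => hsq ⟨m, hmm, hle⟩⟩)
    (((List.range board.length).map (fun (i : Nat) =>
        ((List.range board.length).map (fun (k : Nat) =>
          PySem.List.pyGetD (PySem.List.pyGetD board (k : Int) []) (i : Int) 0)).filter
          (fun v => v != 0))), [], 0)
    (List.replicate board.length 0, [], 0) rfl (init_inv board)
  exact congrArg Prod.snd h
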